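-- pv_equiv track=rewrite | github.com/FilipMinierski/elements-of-ai | ex7.py | count
-- ===== SOURCE A (Python) =====
-- def count(seq):
--     # insert code to return the number of occurrences of 11111 in the sequence
--     n = 0
--     counter = 0
--
--     for num in seq:
--         if num == 1:
--             counter += 1
--         else:
--             counter = 0
--
--         if counter >= 5:
--             n += 1
--
--     return n
-- ===== SOURCE B (Python) =====
-- def count(seq):
--     # run-length scan: a maximal run of L consecutive 1s contributes max(0, L-4) windows
--     total = 0
--     i = 0
--     n = len(seq)
--     while i < n:
--         if seq[i] == 1:
--             j = i
--             while j < n and seq[j] == 1: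
--                 j += 1
--             if j - i > 4:
--                 total += j - i - 4
--             i = j
--         else:
--             i += 1
--     return total
-- ===== Notes on version B (the rewrite author's own statement) =====
-- stated objective: alternative
-- what changed: Replaced the per-element running-counter fold by a run-length scan: each maximal run of L consecutive 1s contributes max(0, L-4) in closed form.
import Mathlib
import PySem

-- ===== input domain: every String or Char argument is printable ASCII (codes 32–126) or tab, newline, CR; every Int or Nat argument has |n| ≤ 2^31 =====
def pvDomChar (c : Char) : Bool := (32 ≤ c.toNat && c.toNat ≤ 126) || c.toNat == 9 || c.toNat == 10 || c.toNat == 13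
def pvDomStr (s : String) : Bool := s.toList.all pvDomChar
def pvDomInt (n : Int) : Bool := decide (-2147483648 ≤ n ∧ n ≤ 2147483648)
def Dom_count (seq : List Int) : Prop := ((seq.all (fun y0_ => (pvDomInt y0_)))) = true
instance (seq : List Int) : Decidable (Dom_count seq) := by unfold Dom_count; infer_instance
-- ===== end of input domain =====

-- B replaces A's per-element running counter by a run-length scan with a closed-form
-- contribution max(0, L-4) per maximal run of 1s (alternative decomposition, same cost).

-- ===== PORT A =====
-- A: fold over the sequence keeping (n, counter); counter resets on non-1, n bumps when counter ≥ 5.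
def countStep (st : Int × Int) (num : Int) : Int × Int :=
  let counter := if num = 1 then st.2 + 1 else 0
  (if counter ≥ 5 then st.1 + 1 else st.1, counter)

def count (seq : List Int) : Int :=
  (seq.foldl countStep (0, 0)).1

-- ===== PORT B =====
-- inner while loop of B: length of the leading run of 1s, and the remainder after it
def countRun : List Int → Nat × List Int
  | [] => (0, [])
  | x :: rest => if x = 1 then ((countRun rest).1 + 1, (countRun rest).2) else (0, x :: rest)

theorem countRun_len_le : ∀ l : List Int, (countRun l).2.length ≤ l.length
  | [] => by simp [countRun]
  | x :: rest => by
      by_cases h : x = 1 <;> simp [countRun, h]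
      exact Nat.le_succ_of_le (countRun_len_le rest)

-- outer loop of B: skip a non-1 element, or consume a whole run and add max(0, L-4)
def count_alt : List Int → Int
  | [] => 0
  | x :: rest =>
    if x = 1 then
      max 0 (((countRun rest).1 + 1 : Int) - 4) + count_alt (countRun rest).2
    else count_alt rest
termination_by l => l.length
decreasing_by
  · exact Nat.lt_succ_of_le (countRun_len_le rest)
  · simp

-- ===== PRECONDITION & SPEC =====
def Spec_count (seq : List Int) (out : Int) : Prop := out = count_alt seq
instance (seq : List Int) (out : Int) : Decidable (Spec_count seq out) := by unfold Spec_count; infer_instance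

-- ===== CLAIM (what is proved, stated in full; the proofs are below) =====
def Claim_equal_count : Prop := ∀ (seq : List Int), Dom_count seq → Spec_count seq (count seq)

-- ===== LEMMAS AND PROOFS =====

-- additivity of the accumulator of A's fold
theorem foldA_add : ∀ (l : List Int) (n c : Int),
    (l.foldl countStep (n, c)).1 = n + (l.foldl countStep (0, c)).1
  | [], n, c => by simp
  | x :: rest, n, c => by
      simp only [List.foldl_cons, countStep]
      by_cases h5 : (if x = 1 then c + 1 else 0) ≥ 5
      · simp only [if_pos h5]
        rw [foldA_add rest (n + 1), foldA_add rest (0 + 1)]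
        ring
      · simp only [if_neg h5]
        rw [foldA_add rest n]

-- A's fold over a run of k ones starting with counter c ≥ 0
theorem foldA_run : ∀ (k : Nat) (n c : Int), 0 ≤ c →
    (List.replicate k 1).foldl countStep (n, c) = (n + max 0 (c + k - 4) - max 0 (c - 4), c + k)
  | 0, n, c, hc => by simp
  | k + 1, n, c, hc => by
      simp only [List.replicate_succ, List.foldl_cons, countStep, if_true]
      rw [foldA_run k _ (c + 1) (by omega)]
      simp only [Prod.mk.injEq]
      refine ⟨?_, by push_cast; ring⟩
      split_ifs with h <;> push_cast <;> omega

theorem countRun_decomp : ∀ l : List Int,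
    l = List.replicate (countRun l).1 1 ++ (countRun l).2 ∧
      (∀ y r', (countRun l).2 = y :: r' → y ≠ 1)
  | [] => by simp [countRun]
  | x :: rest => by
      by_cases h : x = 1
      · obtain ⟨h1, h2⟩ := countRun_decomp rest
        refine ⟨?_, ?_⟩
        · simp only [countRun, h]
          exact congrArg _ h1
        · intro y r' hyr; exact h2 y r' (by simpa [countRun, h] using hyr)
      · refine ⟨by simp [countRun, h], ?_⟩
        intro y r' hyr
        simp only [countRun, if_neg h] at hyr
        injection hyr with h1 _
        exact h1 ▸ h

theorem main_equiv : ∀ (m : Nat) (l : List Int), l.length ≤ m →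
    (l.foldl countStep (0, 0)).1 = count_alt l
  | 0, l, hl => by
      have : l = [] := List.eq_nil_of_length_eq_zero (Nat.le_zero.mp hl)
      subst this; simp [count_alt]
  | m + 1, [], _ => by simp [count_alt]
  | m + 1, x :: rest, hl => by
      by_cases h : x = 1
      · -- decompose x :: rest as a run of k ones followed by r (empty or starting with non-1)
        subst h
        have hk : countRun (1 :: rest) = ((countRun rest).1 + 1, (countRun rest).2) := by
          simp [countRun]
        obtain ⟨hdec, hhd⟩ := countRun_decomp (1 :: rest)
        set k := (countRun (1 :: rest)).1 with hkdef
        set r := (countRun (1 :: rest)).2 with hrdef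
        have hrlen : r.length ≤ rest.length := by
          rw [hrdef, hk]; exact countRun_len_le rest
        have hrun : ((List.replicate k 1 ++ r).foldl countStep (0, 0)).1 =
            max 0 ((k : Int) - 4) + (r.foldl countStep (0, 0)).1 := by
          rw [List.foldl_append, foldA_run k 0 0 le_rfl]
          have hstart : ((0 : Int) + max 0 (0 + (k : Int) - 4) - max 0 ((0:Int) - 4), (0 : Int) + (k : Int))
              = (max 0 ((k : Int) - 4), (k : Int)) := by
            simp only [Prod.mk.injEq]
            constructor <;> omega
          rw [hstart]
          -- fold over r with state (max 0 (k-4), k): r empty or headed by non-1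
          cases hr : r with
          | nil => simp
          | cons y r' =>
              have hy : y ≠ 1 := hhd y r' (hrdef ▸ hr)
              simp only [List.foldl_cons, countStep, if_neg hy]
              have h5 : ¬ ((0 : Int) ≥ 5) := by omega
              simp only [if_neg h5]
              exact foldA_add r' _ 0
        have hres : (((1 : Int) :: rest).foldl countStep (0, 0)).1 =
            max 0 ((k : Int) - 4) + (r.foldl countStep (0, 0)).1 := by
          conv_lhs => rw [hdec]
          exact hrun
        rw [hres, main_equiv m r (by simp at hl; omega)]
        show max 0 ((k : Int) - 4) + count_alt r = count_alt (1 :: rest)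
        rw [count_alt]
        rw [hkdef, hrdef, hk]
        push_cast
        ring
      · simp only [List.foldl_cons, countStep, if_neg h]
        have h5 : ¬ ((0 : Int) ≥ 5) := by omega
        simp only [if_neg h5]
        rw [count_alt, if_neg h]
        exact main_equiv m rest (by simpa using hl)

-- ===== VERDICT (by name: the statement is the Claim_ definition above) =====
theorem count_spec : Claim_equal_count := by
  intro seq _
  unfold Spec_count count
  exact main_equiv seq.length seq le_rfl
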